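-- pv_equiv track=rewrite | github.com/treehorn-dev/FunGen-AI-Powered-Funscript-Generator | tracker/tracker_modules/helpers/chapter_detection.py | _merge_short_chapters
-- ===== SOURCE A (Python) =====
-- from typing import Dict, List, Optional, Tuple
--
-- def _merge_short_chapters(chapters: List[Dict], min_frames: int) -> List[Dict]:
--     """Merge chapters shorter than min_frames into their neighbors."""
--     if len(chapters) <= 1:
--         return chapters
--
--     result = [chapters[0]]
--     for ch in chapters[1:]:
--         duration = ch['end_frame'] - ch['start_frame']
--         if duration < min_frames and result:
--             result[-1]['end_frame'] = ch['end_frame']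
--         else:
--             result.append(ch)
--     return result
-- ===== SOURCE B (Python) =====
-- def _merge_short_chapters(chapters, min_frames):
--     """Merge chapters shorter than min_frames into the preceding kept chapter.
--
--     Two-pointer scan: each kept chapter absorbs the run of short chapters
--     that follows it (heads are mutated in place, like the original)."""
--     if len(chapters) <= 1:
--         return chapters
--     out = []
--     n = len(chapters)
--     i = 0
--     while i < n:
--         head = chapters[i]
--         j = i + 1
--         while j < n and chapters[j]['end_frame'] - chapters[j]['start_frame'] < min_frames:
--             j += 1
--         if j > i + 1:
--             head['end_frame'] = chapters[j - 1]['end_frame']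
--         out.append(head)
--         i = j
--     return out
-- ===== Notes on version B (the rewrite author's own statement) =====
-- stated objective: alternative
-- what changed: Replaces A's single fold that re-patches the last element of a growing result list by a two-pointer scan that, for each kept head chapter, skips the whole following run of short chapters at once and sets the head's end_frame from the last chapter of the run.
import Mathlib
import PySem

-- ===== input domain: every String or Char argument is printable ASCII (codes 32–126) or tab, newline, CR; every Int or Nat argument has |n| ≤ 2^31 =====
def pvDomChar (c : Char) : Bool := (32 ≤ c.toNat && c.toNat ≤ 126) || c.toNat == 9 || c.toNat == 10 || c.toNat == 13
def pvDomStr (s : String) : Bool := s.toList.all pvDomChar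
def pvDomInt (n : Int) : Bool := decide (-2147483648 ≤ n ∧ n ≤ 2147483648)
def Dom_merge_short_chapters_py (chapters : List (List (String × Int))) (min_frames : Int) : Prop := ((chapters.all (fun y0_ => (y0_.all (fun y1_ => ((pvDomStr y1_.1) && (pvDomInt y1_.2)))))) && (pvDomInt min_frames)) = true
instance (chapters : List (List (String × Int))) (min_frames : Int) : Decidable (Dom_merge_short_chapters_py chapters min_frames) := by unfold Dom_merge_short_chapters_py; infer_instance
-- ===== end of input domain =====

-- B replaces A's accumulate-and-patch-the-last-element fold by a two-pointer scan that
-- jumps over each run of short chapters at once (objective: alternative decomposition;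
-- equivalence is about the RETURN value — both Pythons mutate the head dicts in place).

-- ch['end_frame'] - ch['start_frame']; the getD default 0 is never reached inside Pre_
def pvChDur (ch : List (String × Int)) : Int :=
  (PySem.Dict.mk ch).getD "end_frame" 0 - (PySem.Dict.mk ch).getD "start_frame" 0

-- d['end_frame'] = v  (overwrite in place / append if absent, Python dict semantics)
def pvSetEnd (ch : List (String × Int)) (v : Int) : List (String × Int) :=
  ((PySem.Dict.mk ch).insert "end_frame" v).items

-- ===== PORT A =====
-- loop body of A: merge into result[-1] or append
def pvAStep (min_frames : Int) (result : List (List (String × Int)))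
    (ch : List (String × Int)) : List (List (String × Int)) :=
  if pvChDur ch < min_frames ∧ result ≠ [] then
    result.dropLast ++ [pvSetEnd result.getLast! ((PySem.Dict.mk ch).getD "end_frame" 0)]
  else
    result ++ [ch]

def merge_short_chapters_py (chapters : List (List (String × Int))) (min_frames : Int) :
    List (List (String × Int)) :=
  if chapters.length ≤ 1 then chapters
  else
    match chapters with
    | [] => chapters
    | c0 :: rest => rest.foldl (pvAStep min_frames) [c0]

-- ===== PORT B =====
-- B's outer while-loop: take the head, skip its run of short chapters, recurse at j
def pvGo (min_frames : Int) : List (List (String × Int)) → List (List (String × Int))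
  | [] => []
  | head :: rest =>
    let run := rest.takeWhile (fun ch => pvChDur ch < min_frames)
    let head' := if run.isEmpty then head
                 else pvSetEnd head ((PySem.Dict.mk run.getLast!).getD "end_frame" 0)
    head' :: pvGo min_frames (rest.drop run.length)
termination_by l => l.length
decreasing_by simp

def merge_short_chapters_py_alt (chapters : List (List (String × Int))) (min_frames : Int) :
    List (List (String × Int)) :=
  if chapters.length ≤ 1 then chapters else pvGo min_frames chapters

-- ===== PRECONDITION & SPEC =====
-- Pre_ excludes exactly the inputs on which Python A raises KeyError: a chapter after the
-- first that lacks the key 'start_frame' or 'end_frame' (the first chapter's keys are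
-- never read by A, so only chapters.drop 1 is constrained).
def Pre_merge_short_chapters_py (chapters : List (List (String × Int))) (min_frames : Int) : Prop :=
  ∀ ch ∈ chapters.drop 1,
    (PySem.Dict.mk ch).contains "start_frame" = true ∧
    (PySem.Dict.mk ch).contains "end_frame" = true

instance (chapters : List (List (String × Int))) (min_frames : Int) :
    Decidable (Pre_merge_short_chapters_py chapters min_frames) := by
  unfold Pre_merge_short_chapters_py; infer_instance

def pvWitness_merge_short_chapters_py : (List (List (String × Int))) × Int :=
  ([[("start_frame", 0), ("end_frame", 10)], [("start_frame", 10), ("end_frame", 12)]], 5)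

def Spec_merge_short_chapters_py (chapters : List (List (String × Int))) (min_frames : Int)
    (out : List (List (String × Int))) : Prop :=
  out = merge_short_chapters_py_alt chapters min_frames

instance (chapters : List (List (String × Int))) (min_frames : Int)
    (out : List (List (String × Int))) :
    Decidable (Spec_merge_short_chapters_py chapters min_frames out) := by
  unfold Spec_merge_short_chapters_py; infer_instance

-- ===== CLAIM (what is proved, stated in full; the proofs are below) =====
def Claim_equal_merge_short_chapters_py : Prop := ∀ (chapters : List (List (String × Int))) (min_frames : Int), Dom_merge_short_chapters_py chapters min_frames → Pre_merge_short_chapters_py chapters min_frames → Spec_merge_short_chapters_py chapters min_frames (merge_short_chapters_py chapters min_frames)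

-- ===== LEMMAS AND PROOFS =====

lemma pvSetEnd_setEnd (h : List (String × Int)) (v w : Int) :
    pvSetEnd (pvSetEnd h v) w = pvSetEnd h w := by
  show (((PySem.Dict.mk h).insert "end_frame" v).insert "end_frame" w).items
      = ((PySem.Dict.mk h).insert "end_frame" w).items
  rw [PySem.Dict.insert_insert_self]

-- the key invariant: A's fold on acc ++ [h] produces acc ++ (B's scan on h :: rest)
lemma pvFoldA_eq (m : Int) (rest : List (List (String × Int))) :
    ∀ (acc : List (List (String × Int))) (h : List (String × Int)),
      rest.foldl (pvAStep m) (acc ++ [h]) = acc ++ pvGo m (h :: rest) := by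
  induction rest with
  | nil => intro acc h; simp [pvGo]
  | cons ch rest' ih =>
    intro acc h
    by_cases hsh : pvChDur ch < m
    · have hstep : pvAStep m (acc ++ [h]) ch
          = acc ++ [pvSetEnd h ((PySem.Dict.mk ch).getD "end_frame" 0)] := by
        simp [pvAStep, hsh]
      rw [List.foldl_cons, hstep, ih]
      congr 1
      cases hrun : rest'.takeWhile (fun c => decide (pvChDur c < m)) with
      | nil => simp [pvGo, hrun, hsh]
      | cons x xs =>
        have htw : List.takeWhile (fun c => decide (pvChDur c < m)) (ch :: rest')
            = ch :: (x :: xs) := by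
          simp [hsh, hrun]
        simp [pvGo, htw, hrun, pvSetEnd_setEnd, List.getLast!]
    · have hstep : pvAStep m (acc ++ [h]) ch = (acc ++ [h]) ++ [ch] := by
        simp [pvAStep, hsh]
      rw [List.foldl_cons, hstep, ih (acc ++ [h]) ch]
      simp [pvGo, hsh]

-- ===== VERDICT (by name: the statement is the Claim_ definition above) =====
theorem merge_short_chapters_py_spec : Claim_equal_merge_short_chapters_py := by
  intro chapters min_frames _hdom _hpre
  unfold Spec_merge_short_chapters_py merge_short_chapters_py merge_short_chapters_py_alt
  by_cases hl : chapters.length <= 1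
  · simp [hl]
  · cases chapters with
    | nil => simp at hl
    | cons c0 rest =>
      rw [if_neg hl, if_neg hl]
      simpa using pvFoldA_eq min_frames rest [] c0
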